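-- pv_equiv track=rewrite | github.com/TinRain/-oj | 算法课代码_持续更新/class1_3.py | func
-- ===== SOURCE A (Python) =====
-- def func(arr):
--     count = 0
--     copy = []
--     for i in arr:
--         copy.append(i)
--     copy.sort()
--     for i in range(len(copy)):
--         count += arr.index(copy[i])
--         arr.remove(copy[i])
--     return count
-- ===== SOURCE B (Python) =====
-- def func(arr):
--     # A sums, for each element extracted in sorted order, its index in the shrinking
--     # list; that total equals the number of inversions of arr, which B counts with a
--     # bottom-up merge sort in O(n log n) instead of A's quadratic extract-and-remove.
--     # NOTE: A empties arr in place; B does not mutate arr (return value is identical).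
--     total = 0
--     runs = [[x] for x in arr]
--     while len(runs) > 1:
--         merged_runs = []
--         for k in range(0, len(runs) - 1, 2):
--             left, right = runs[k], runs[k + 1]
--             out = []
--             i = j = 0
--             while i < len(left) and j < len(right):
--                 if left[i] <= right[j]:
--                     out.append(left[i])
--                     i += 1
--                 else:
--                     out.append(right[j])
--                     j += 1
--                     total += len(left) - i
--             out.extend(left[i:])
--             out.extend(right[j:])
--             merged_runs.append(out)
--         if len(runs) % 2 == 1:
--             merged_runs.append(runs[-1])
--         runs = merged_runs
--     return total
-- ===== Notes on version B (the rewrite author's own statement) =====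
-- stated objective: faster
-- what changed: A repeatedly finds and removes the minimum from the list (after an initial sort), summing current indices; B recognises this total as the inversion count of arr and computes it with a bottom-up merge sort that counts cross-inversions during each merge.
import Mathlib
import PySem

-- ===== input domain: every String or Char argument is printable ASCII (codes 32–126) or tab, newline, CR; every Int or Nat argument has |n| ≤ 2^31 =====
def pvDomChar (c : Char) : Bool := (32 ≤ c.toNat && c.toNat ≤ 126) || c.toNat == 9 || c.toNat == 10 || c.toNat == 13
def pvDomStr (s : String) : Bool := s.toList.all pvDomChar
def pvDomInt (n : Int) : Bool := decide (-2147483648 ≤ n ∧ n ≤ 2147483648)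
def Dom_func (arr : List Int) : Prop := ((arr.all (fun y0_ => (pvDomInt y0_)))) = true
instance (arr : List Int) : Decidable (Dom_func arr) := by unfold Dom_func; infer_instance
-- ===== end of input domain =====

-- B counts the same quantity (the number of inversions of arr) with a bottom-up
-- merge sort, O(n log n) instead of A's quadratic sort-then-index/remove loop.
-- A empties arr in place; B does not mutate it: the equivalence is about the return value.

-- ===== PORT A =====
-- for i in range(len(copy)): count += arr.index(copy[i]); arr.remove(copy[i])
-- state = (count, current arr); index/remove never fail here (copy permutes arr), getD is the total default
def func (arr : List Int) : Int :=
  let copy := arr.foldl (fun c i => c ++ [i]) []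
  let copy := PySem.List.sorted copy (fun x => x) false
  let st := copy.foldl
    (fun (s : Int × List Int) x =>
      (s.1 + (((PySem.List.index? s.2 x).getD 0 : Nat) : Int),
       (PySem.List.remove? s.2 x).getD s.2))
    (0, arr)
  st.1

-- ===== PORT B =====
-- the inner while-merge of Source B: merges two runs, counting len(left)-i each time a right element wins
def pvMrg : List Int → List Int → List Int × Nat
  | [], right => (right, 0)
  | left, [] => (left, 0)
  | x :: l, y :: r =>
    if x ≤ y then
      let p := pvMrg l (y :: r)
      (x :: p.1, p.2)
    else
      let p := pvMrg (x :: l) r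
      (y :: p.1, p.2 + (l.length + 1))
  termination_by l r => l.length + r.length

-- the for-k-in-range(0,len-1,2) pass of Source B: merge adjacent runs, keep an odd leftover
def pvPass : List (List Int) → List (List Int) × Nat
  | [] => ([], 0)
  | [r] => ([r], 0)
  | a :: b :: rest =>
    let p := pvMrg a b
    let q := pvPass rest
    (p.1 :: q.1, p.2 + q.2)

-- needed only for pvLoop's termination
theorem pvPass_length_le : ∀ rs : List (List Int), (pvPass rs).1.length ≤ rs.length
  | [] => by simp [pvPass]
  | [r] => by simp [pvPass]
  | a :: b :: rest => by
      have := pvPass_length_le rest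
      simp [pvPass]; omega

theorem pvPass_length_lt (rs : List (List Int)) (_h : 1 < rs.length) :
    (pvPass rs).1.length < rs.length := by
  match rs with
  | [] => simp at _h
  | [r] => simp at _h
  | a :: b :: rest =>
      have := pvPass_length_le rest
      simp [pvPass]; omega

-- the while len(runs) > 1 loop of Source B
def pvLoop (runs : List (List Int)) (total : Int) : Int :=
  if h : 1 < runs.length then
    pvLoop (pvPass runs).1 (total + ((pvPass runs).2 : Int))
  else total
  termination_by runs.length
  decreasing_by exact pvPass_length_lt runs h

def func_alt (arr : List Int) : Int :=
  pvLoop (arr.map (fun x => [x])) 0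

-- ===== PRECONDITION & SPEC =====
def Spec_func (arr : List Int) (out : Int) : Prop := out = func_alt arr
instance (arr : List Int) (out : Int) : Decidable (Spec_func arr out) := by unfold Spec_func; infer_instance

-- ===== CLAIM (what is proved, stated in full; the proofs are below) =====
def Claim_equal_func : Prop := ∀ (arr : List Int), Dom_func arr → Spec_func arr (func arr)

-- ===== LEMMAS AND PROOFS =====

-- number of inversions: pairs (earlier, later) with earlier > later
def pvInv : List Int → Nat
  | [] => 0
  | x :: t => t.countP (fun y => decide (y < x)) + pvInv t

-- cross u v = #{(x,y) : x ∈ u, y ∈ v, x > y}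
def pvCross (u : List Int) : List Int → Nat
  | [] => 0
  | y :: v => u.countP (fun x => decide (y < x)) + pvCross u v

theorem pvCross_nil_left : ∀ v, pvCross [] v = 0
  | [] => rfl
  | y :: v => by simp [pvCross, pvCross_nil_left v]

theorem pvCross_cons_left (x : Int) (u : List Int) : ∀ v,
    pvCross (x :: u) v = v.countP (fun y => decide (y < x)) + pvCross u v
  | [] => by simp [pvCross]
  | y :: v => by
      have := pvCross_cons_left x u v
      simp [pvCross, List.countP_cons]; omega

theorem pvCross_append_right (u : List Int) : ∀ v w,
    pvCross u (v ++ w) = pvCross u v + pvCross u w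
  | [], w => by simp [pvCross]
  | y :: v, w => by
      have := pvCross_append_right u v w
      simp [pvCross]; omega

theorem pvCross_append_left (u v : List Int) : ∀ w,
    pvCross (u ++ v) w = pvCross u w + pvCross v w
  | [] => by simp [pvCross]
  | y :: w => by
      have := pvCross_append_left u v w
      simp [pvCross, List.countP_append]; omega

theorem pvCross_perm_left {u u' : List Int} (h : u.Perm u') (v : List Int) :
    pvCross u v = pvCross u' v := by
  induction v with
  | nil => simp [pvCross]
  | cons y v ih => simp [pvCross, ih, h.countP_eq]

theorem pvCross_perm_right (u : List Int) {v v' : List Int} (h : v.Perm v') :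
    pvCross u v = pvCross u v' := by
  induction h with
  | nil => rfl
  | cons y _ ih => simp [pvCross, ih]
  | swap a b l => simp [pvCross]; omega
  | trans _ _ ih1 ih2 => omega

theorem pvInv_append : ∀ u v : List Int, pvInv (u ++ v) = pvInv u + pvCross u v + pvInv v
  | [], v => by simp [pvInv, pvCross_nil_left]
  | x :: u, v => by
      have := pvInv_append u v
      simp [pvInv, List.countP_append, pvCross_cons_left]; omega

theorem pvInv_eq_zero_of_pairwise : ∀ {l : List Int}, l.Pairwise (· ≤ ·) → pvInv l = 0
  | [], _ => rfl
  | x :: t, h => by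
      have h1 : t.countP (fun y => decide (y < x)) = 0 := by
        rw [List.countP_eq_zero]
        intro y hy
        have := (List.pairwise_cons.mp h).1 y hy
        simp; omega
      simp [pvInv, h1, pvInv_eq_zero_of_pairwise (List.pairwise_cons.mp h).2]

-- merge correctness: result is a sorted permutation of a ++ b and the count is pvCross a b
theorem pvMrg_spec : ∀ a b : List Int, a.Pairwise (· ≤ ·) → b.Pairwise (· ≤ ·) →
    (pvMrg a b).1.Perm (a ++ b) ∧ (pvMrg a b).1.Pairwise (· ≤ ·) ∧
      (pvMrg a b).2 = pvCross a b := by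
  intro a b
  induction a, b using pvMrg.induct with
  | case1 right =>
      intro _ hb
      simpa [pvMrg, pvCross_nil_left] using hb
  | case2 left h =>
      intro ha _
      simpa [pvMrg, pvCross] using ha
  | case3 x l y r hxy ih =>
      intro ha hb
      have hxl := (List.pairwise_cons.mp ha).1
      have hyr := (List.pairwise_cons.mp hb).1
      obtain ⟨hp, hs, hc⟩ := ih (List.pairwise_cons.mp ha).2 hb
      refine ⟨?_, ?_, ?_⟩
      · simpa [pvMrg, hxy] using hp.cons x
      · simp only [pvMrg, hxy, if_true]
        rw [List.pairwise_cons]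
        refine ⟨?_, hs⟩
        intro z hz
        rcases List.mem_append.mp (hp.subset hz) with h' | h'
        · exact hxl z h'
        · rcases List.mem_cons.mp h' with rfl | h''
          · exact hxy
          · exact le_trans hxy (hyr z h'')
      · have hcount : (y :: r).countP (fun t => decide (t < x)) = 0 := by
          rw [List.countP_eq_zero]
          intro t ht
          rcases List.mem_cons.mp ht with rfl | ht'
          · simp; omega
          · have := hyr t ht'
            simp; omega
        simp only [pvMrg, hxy, if_true]
        rw [pvCross_cons_left, hcount, hc]
        omega
  | case4 x l y r hxy ih =>
      intro ha hb
      have hyx : y < x := by omega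
      have hxl := (List.pairwise_cons.mp ha).1
      have hyr := (List.pairwise_cons.mp hb).1
      obtain ⟨hp, hs, hc⟩ := ih ha (List.pairwise_cons.mp hb).2
      refine ⟨?_, ?_, ?_⟩
      · simp only [pvMrg, hxy, if_false]
        exact (hp.cons y).trans List.perm_middle.symm
      · simp only [pvMrg, hxy, if_false]
        rw [List.pairwise_cons]
        refine ⟨?_, hs⟩
        intro z hz
        rcases List.mem_append.mp (hp.subset hz) with h' | h'
        · rcases List.mem_cons.mp h' with rfl | h''
          · omega
          · have := hxl z h''; omega
        · exact hyr z h'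
      · have hcount : (x :: l).countP (fun t => decide (y < t)) = (x :: l).length := by
          rw [List.countP_eq_length]
          intro t ht
          rcases List.mem_cons.mp ht with rfl | ht'
          · simp; omega
          · have := hxl t ht'
            simp; omega
        simp only [pvMrg, hxy, if_false]
        show (pvMrg (x :: l) r).2 + (l.length + 1) = pvCross (x :: l) (y :: r)
        rw [hc]
        show pvCross (x :: l) r + (l.length + 1) = pvCross (x :: l) (y :: r)
        simp only [pvCross, hcount, List.length_cons]
        omega

-- one bottom-up pass: runs stay sorted, the flattened content is permuted,
-- and the counted merges account exactly for the inversions removed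
theorem pvPass_spec : ∀ rs : List (List Int), (∀ r ∈ rs, r.Pairwise (· ≤ ·)) →
    (∀ r ∈ (pvPass rs).1, r.Pairwise (· ≤ ·)) ∧
      (pvPass rs).1.flatten.Perm rs.flatten ∧
      pvInv ((pvPass rs).1.flatten) + (pvPass rs).2 = pvInv rs.flatten := by
  intro rs
  induction rs using pvPass.induct with
  | case1 => intro _; simp [pvPass]
  | case2 r => intro h; simpa [pvPass] using h
  | case3 a b rest ih =>
      intro h
      have ha := h a (by simp)
      have hb := h b (by simp)
      obtain ⟨ho, hosort, hocnt⟩ := pvMrg_spec a b ha hb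
      obtain ⟨ih1, ih2, ih3⟩ := ih (fun r hr => h r (by simp [hr]))
      refine ⟨?_, ?_, ?_⟩
      · intro r hr
        simp only [pvPass] at hr
        rcases List.mem_cons.mp hr with rfl | hr'
        · exact hosort
        · exact ih1 r hr'
      · simp only [pvPass, List.flatten_cons]
        calc ((pvMrg a b).1 ++ (pvPass rest).1.flatten).Perm
              ((a ++ b) ++ rest.flatten) := ho.append ih2
          _ = a ++ (b ++ rest.flatten) := by simp
      · simp only [pvPass, List.flatten_cons]
        rw [pvInv_append, pvInv_append, pvInv_append (u := b)]
        rw [pvInv_eq_zero_of_pairwise hosort, pvInv_eq_zero_of_pairwise ha,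
            pvInv_eq_zero_of_pairwise hb]
        have e1 : pvCross (pvMrg a b).1 (pvPass rest).1.flatten
            = pvCross (a ++ b) rest.flatten := by
          rw [pvCross_perm_left ho, pvCross_perm_right _ ih2]
        rw [e1, pvCross_append_left, pvCross_append_right, hocnt]
        omega

-- the while loop computes total + (inversions still inside the runs)
theorem pvLoop_eq : ∀ (n : Nat) (rs : List (List Int)) (total : Int), rs.length ≤ n →
    (∀ r ∈ rs, r.Pairwise (· ≤ ·)) →
    pvLoop rs total = total + (pvInv rs.flatten : Int) := by
  intro n
  induction n with
  | zero =>
      intro rs total hlen _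
      have : rs = [] := List.length_eq_zero_iff.mp (Nat.le_zero.mp hlen)
      subst this
      rw [pvLoop]; simp [pvInv]
  | succ n ih =>
      intro rs total hlen hsort
      by_cases h : 1 < rs.length
      · obtain ⟨h1, h2, h3⟩ := pvPass_spec rs hsort
        rw [pvLoop]
        simp only [h, dif_pos]
        have hlt := pvPass_length_lt rs h
        rw [ih _ _ (by omega) h1]
        omega
      · rw [pvLoop]
        simp only [h, dif_neg, not_false_iff]
        match rs, h with
        | [], _ => simp [pvInv]
        | [r], _ =>
            have := pvInv_eq_zero_of_pairwise (hsort r (by simp))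
            simp [this]
        | a :: b :: rest, h => exact absurd (by simp) h

theorem flatten_map_singleton : ∀ l : List Int, (l.map (fun x => [x])).flatten = l
  | [] => rfl
  | x :: t => by simp [flatten_map_singleton t]

-- B computes the inversion count
theorem func_alt_eq (arr : List Int) : func_alt arr = (pvInv arr : Int) := by
  unfold func_alt
  rw [pvLoop_eq (arr.map (fun x => [x])).length _ 0 (le_refl _)
      (by intro r hr; simp at hr; obtain ⟨x, _, rfl⟩ := hr; simp)]
  rw [flatten_map_singleton]
  simp

-- A-side: extracting the minimum m of l adds index-of-m inversions
theorem pvIndex_erase : ∀ (l : List Int) (m : Int), m ∈ l → (∀ y ∈ l, m ≤ y) →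
    ∃ k : Nat, PySem.List.index? l m = some k ∧
      pvInv l = k + pvInv (l.erase m) := by
  intro l
  induction l with
  | nil => intro m hm; simp at hm
  | cons x t ih =>
      intro m hm hmin
      by_cases hx : x = m
      · subst hx
        refine ⟨0, PySem.List.index?_cons_self _ _, ?_⟩
        have : t.countP (fun y => decide (y < x)) = 0 := by
          rw [List.countP_eq_zero]
          intro y hy
          have := hmin y (by simp [hy])
          simp; omega
        simp [pvInv, this, List.erase_cons_head]
      · have hmt : m ∈ t := by
          rcases List.mem_cons.mp hm with rfl | h'
          · exact absurd rfl hx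
          · exact h'
        obtain ⟨k, hk, hinv⟩ := ih m hmt (fun y hy => hmin y (by simp [hy]))
        refine ⟨k + 1, ?_, ?_⟩
        · rw [PySem.List.index?_cons_of_ne t hx, hk]; rfl
        · have hxm : m < x := lt_of_le_of_ne (hmin x (by simp)) (fun h => hx h.symm)
          have herase : (x :: t).erase m = x :: t.erase m :=
            List.erase_cons_tail (by simp [hx])
          have hperm := List.perm_cons_erase hmt
          have hcnt : t.countP (fun y => decide (y < x))
              = (t.erase m).countP (fun y => decide (y < x)) + 1 := by
            rw [hperm.countP_eq]
            simp [hxm]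
          rw [herase]
          simp [pvInv] at *
          omega

-- A's extraction loop over a sorted permutation of rem adds pvInv rem
theorem pvFoldA : ∀ (s rem : List Int) (c : Int), s.Pairwise (· ≤ ·) → s.Perm rem →
    (s.foldl
      (fun (s : Int × List Int) x =>
        (s.1 + (((PySem.List.index? s.2 x).getD 0 : Nat) : Int),
         (PySem.List.remove? s.2 x).getD s.2))
      (c, rem)).1 = c + (pvInv rem : Int) := by
  intro s
  induction s with
  | nil =>
      intro rem c _ hperm
      have : rem = [] := (hperm.symm).eq_nil
      subst this
      simp [pvInv]
  | cons x s ih =>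
      intro rem c hsort hperm
      have hmem : x ∈ rem := hperm.subset (by simp)
      have hmin : ∀ y ∈ rem, x ≤ y := by
        intro y hy
        rcases List.mem_cons.mp (hperm.symm.subset hy) with rfl | h'
        · exact le_refl y
        · exact (List.pairwise_cons.mp hsort).1 y h'
      obtain ⟨k, hk, hinv⟩ := pvIndex_erase rem x hmem hmin
      have hrm := PySem.List.remove?_eq_some_erase rem x hmem
      have hperm' : s.Perm (rem.erase x) :=
        (List.cons_perm_iff_perm_erase.mp hperm).2
      simp only [List.foldl_cons, hk, hrm, Option.getD_some]
      rw [ih (rem.erase x) _ (List.pairwise_cons.mp hsort).2 hperm']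
      rw [hinv]
      push_cast
      ring

-- the copy-building loop is the identity
theorem pvCopy_eq (arr : List Int) : arr.foldl (fun c i => c ++ [i]) [] = arr := by
  simpa using PySem.List.foldl_append_singleton arr []

-- A computes the inversion count
theorem func_eq (arr : List Int) : func arr = (pvInv arr : Int) := by
  unfold func
  rw [pvCopy_eq]
  have hsort : (PySem.List.sorted arr (fun x => x) false).Pairwise (· ≤ ·) := by
    have := PySem.List.sorted_pairwise arr (fun x => x)
    simpa using this
  have hperm := PySem.List.sorted_perm arr (fun x => x) false
  rw [pvFoldA _ arr 0 hsort hperm]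
  simp

-- ===== VERDICT (by name: the statement is the Claim_ definition above) =====
theorem func_spec : Claim_equal_func := by
  intro arr _
  unfold Spec_func
  rw [func_eq, func_alt_eq]
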